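-- pv_equiv track=rewrite | github.com/julgitt/University_tasks | sztuczna_inteligencja/pracownia3/zad1/main.py | get_all_line_definite_cells
-- ===== SOURCE A (Python) =====
-- def get_all_line_definite_cells(domains, is_col, index):
--     line_cells_on = set()
--     line_cells_off = set()
--     for i, bit in enumerate(domains[is_col][index][0]):
--         if bit == 1:
--             line_cells_on.add(i)
--         elif bit == 0:
--             line_cells_off.add(i)
--
--     for example_solution in domains[is_col][index][1:]:
--         for i, bit in enumerate(example_solution):
--             if bit == 1:
--                 try:
--                     line_cells_off.remove(i)
--                 except KeyError:
--                     pass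
--             elif bit == 0:
--                 try:
--                     line_cells_on.remove(i)
--                 except KeyError:
--                     pass
--     return line_cells_on, line_cells_off
-- ===== SOURCE B (Python) =====
-- def get_all_line_definite_cells(domains, is_col, index):
--     solutions = domains[is_col][index]
--     first, rest = solutions[0], solutions[1:]
--
--     def stable(i, want, avoid):
--         # cell i is definitely `want` iff the first solution says so and no
--         # other solution contradicts it with `avoid` at that position
--         return first[i] == want and all(
--             not (i < len(sol) and sol[i] == avoid) for sol in rest)
--
--     return ({i for i in range(len(first)) if stable(i, 1, 0)},
--             {i for i in range(len(first)) if stable(i, 0, 1)})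
-- ===== Notes on version B (the rewrite author's own statement) =====
-- stated objective: alternative
-- what changed: B is column-wise: for each cell index it evaluates a single per-cell predicate (first solution has the wanted bit and no later solution has the contradicting bit at that index), instead of A's row-wise sweep that builds candidate sets and mutates them with per-cell try/remove.
import Mathlib
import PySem

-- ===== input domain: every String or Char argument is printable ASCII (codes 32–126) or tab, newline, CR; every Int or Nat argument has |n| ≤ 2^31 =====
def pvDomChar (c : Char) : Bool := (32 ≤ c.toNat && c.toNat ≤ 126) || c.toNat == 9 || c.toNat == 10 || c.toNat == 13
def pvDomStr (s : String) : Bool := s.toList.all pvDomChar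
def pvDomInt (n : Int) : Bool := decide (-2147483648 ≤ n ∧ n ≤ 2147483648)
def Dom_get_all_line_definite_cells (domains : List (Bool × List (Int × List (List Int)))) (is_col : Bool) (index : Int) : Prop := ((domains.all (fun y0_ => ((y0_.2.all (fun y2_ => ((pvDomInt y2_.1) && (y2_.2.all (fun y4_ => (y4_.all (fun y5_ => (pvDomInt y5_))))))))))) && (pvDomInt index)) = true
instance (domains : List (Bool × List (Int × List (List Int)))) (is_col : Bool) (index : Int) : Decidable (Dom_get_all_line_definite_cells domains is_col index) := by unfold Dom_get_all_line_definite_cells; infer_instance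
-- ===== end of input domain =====

-- B is column-wise: a single per-cell-index predicate over all solutions, instead of A's
-- row-wise sweep that builds candidate sets and mutates them with per-cell try/remove.

-- ===== PORT A =====
-- domains is a dict keyed by bool, its values dicts keyed by int (assoc lists under the type convention);
-- 'try: s.remove(i) except KeyError: pass' is exactly PySem.Set.discard.
def get_all_line_definite_cells (domains : List (Bool × List (Int × List (List Int)))) (is_col : Bool) (index : Int) : List Int × List Int :=
  let sols : List (List Int) :=
    (((PySem.Dict.mk domains).get? is_col).bind (fun d => (PySem.Dict.mk d).get? index)).getD []
  let first : List Int := (PySem.List.pyGet? sols 0).getD []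
  let init : PySem.Set Int × PySem.Set Int :=
    (PySem.List.enumerate first 0).foldl
      (fun st p =>
        if p.2 == 1 then (st.1.add p.1, st.2)
        else if p.2 == 0 then (st.1, st.2.add p.1)
        else st)
      (PySem.Set.empty, PySem.Set.empty)
  (PySem.List.slice sols (some 1) none).foldl
    (fun st sol =>
      (PySem.List.enumerate sol 0).foldl
        (fun st p =>
          if p.2 == 1 then (st.1, PySem.Set.discard st.2 p.1)
          else if p.2 == 0 then (PySem.Set.discard st.1 p.1, st.2)
          else st)
        st)
    init

-- ===== PORT B =====
-- stable(i, want, avoid) from Source B; first[i] is first accessed with a valid 0 ≤ i < len(first),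
-- sol[i] guarded by i < len(sol), so pyGet? == some _ is exact.
def pvStable (first : List Int) (rest : List (List Int)) (i want avoid : Int) : Bool :=
  (PySem.List.pyGet? first i == some want) &&
  rest.all (fun sol => !(decide (i < (sol.length : Int)) && (PySem.List.pyGet? sol i == some avoid)))

def get_all_line_definite_cells_alt (domains : List (Bool × List (Int × List (List Int)))) (is_col : Bool) (index : Int) : List Int × List Int :=
  let solutions : List (List Int) :=
    (((PySem.Dict.mk domains).get? is_col).bind (fun d => (PySem.Dict.mk d).get? index)).getD []
  let first : List Int := (PySem.List.pyGet? solutions 0).getD []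
  let rest : List (List Int) := PySem.List.slice solutions (some 1) none
  ((PySem.List.pyRange 0 first.length 1).filter (fun i => pvStable first rest i 1 0),
   (PySem.List.pyRange 0 first.length 1).filter (fun i => pvStable first rest i 0 1))

-- ===== PRECONDITION & SPEC =====
-- Pre_ excludes exactly the inputs where A raises: a missing bool/int key (KeyError) or an empty
-- solutions list (IndexError on [0]).
def Pre_get_all_line_definite_cells (domains : List (Bool × List (Int × List (List Int)))) (is_col : Bool) (index : Int) : Prop :=
  (((PySem.Dict.mk domains).get? is_col).bind (fun d => (PySem.Dict.mk d).get? index)).getD [] ≠ ([] : List (List Int))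
instance (domains : List (Bool × List (Int × List (List Int)))) (is_col : Bool) (index : Int) : Decidable (Pre_get_all_line_definite_cells domains is_col index) := by unfold Pre_get_all_line_definite_cells; infer_instance

def pvWitness_get_all_line_definite_cells : (List (Bool × List (Int × List (List Int)))) × Bool × Int :=
  ([(false, [(0, [[1, 0, 2], [1, 1, 0]])])], false, 0)

def Spec_get_all_line_definite_cells (domains : List (Bool × List (Int × List (List Int)))) (is_col : Bool) (index : Int) (out : List Int × List Int) : Prop := out = get_all_line_definite_cells_alt domains is_col index
instance (domains : List (Bool × List (Int × List (List Int)))) (is_col : Bool) (index : Int) (out : List Int × List Int) : Decidable (Spec_get_all_line_definite_cells domains is_col index out) := by unfold Spec_get_all_line_definite_cells; infer_instance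

-- ===== CLAIM (what is proved, stated in full; the proofs are below) =====
def Claim_equal_get_all_line_definite_cells : Prop := ∀ (domains : List (Bool × List (Int × List (List Int)))) (is_col : Bool) (index : Int), Dom_get_all_line_definite_cells domains is_col index → Pre_get_all_line_definite_cells domains is_col index → Spec_get_all_line_definite_cells domains is_col index (get_all_line_definite_cells domains is_col index)

-- ===== LEMMAS AND PROOFS =====

-- positions of value v in an enumerated row
def pvPos (v : Int) (l : List (Int × Int)) : List Int :=
  l.filterMap (fun p => if p.2 == v then some p.1 else none)

theorem pvAddLoop (v w : Int) (hvw : v ≠ w) (l : List (Int × Int)) (s t : PySem.Set Int) :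
    l.foldl (fun st p => if p.2 == v then (st.1.add p.1, st.2)
                         else if p.2 == w then (st.1, st.2.add p.1) else st) (s, t)
    = (s.update (pvPos v l), t.update (pvPos w l)) := by
  induction l generalizing s t with
  | nil => simp [pvPos, PySem.Set.update]
  | cons p l ih =>
    simp only [List.foldl_cons]
    by_cases h1 : (p.2 == v) = true
    · have h0 : (p.2 == w) = false := by
        rw [beq_iff_eq] at h1; simp [h1, hvw]
      have h1' : p.2 = v := beq_iff_eq.mp h1
      have h0' : p.2 ≠ w := by simpa using h0
      rw [if_pos h1, ih,
        show pvPos v (p :: l) = p.1 :: pvPos v l from by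
          simp [pvPos, h1'],
        show pvPos w (p :: l) = pvPos w l from by
          simp [pvPos, h0'],
        PySem.Set.update_cons]
    · rw [if_neg (by simp_all)]
      have h1' : p.2 ≠ v := by simpa using h1
      by_cases h0 : (p.2 == w) = true
      · have h0' : p.2 = w := beq_iff_eq.mp h0
        rw [if_pos h0, ih,
          show pvPos v (p :: l) = pvPos v l from by
            simp [pvPos, h1'],
          show pvPos w (p :: l) = p.1 :: pvPos w l from by
            simp [pvPos, h0'],
          PySem.Set.update_cons]
      · have h0' : p.2 ≠ w := by simpa using h0
        rw [if_neg (by simp_all), ih,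
          show pvPos v (p :: l) = pvPos v l from by
            simp [pvPos, h1'],
          show pvPos w (p :: l) = pvPos w l from by
            simp [pvPos, h0']]

theorem pvRemLoop (l : List (Int × Int)) (s t : List Int) :
    l.foldl (fun st p => if p.2 == 1 then (st.1, PySem.Set.discard st.2 p.1)
                         else if p.2 == 0 then (PySem.Set.discard st.1 p.1, st.2) else st) (s, t)
    = (s.filter (fun i => !(pvPos 0 l).contains i),
       t.filter (fun i => !(pvPos 1 l).contains i)) := by
  induction l generalizing s t with
  | nil => simp [pvPos]
  | cons p l ih =>
    simp only [List.foldl_cons]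
    by_cases h1 : (p.2 == (1 : Int)) = true
    · have h0 : (p.2 == (0 : Int)) = false := by
        rw [beq_iff_eq] at h1; simp [h1]
      have h1' : p.2 = 1 := beq_iff_eq.mp h1
      have h0' : p.2 ≠ 0 := by simpa using h0
      rw [if_pos h1, ih,
        show pvPos 1 (p :: l) = p.1 :: pvPos 1 l from by
          simp [pvPos, h1'],
        show pvPos 0 (p :: l) = pvPos 0 l from by
          simp [pvPos, h0']]
      refine Prod.ext rfl ?_
      simp only [PySem.Set.discard, List.filter_filter]
      apply List.filter_congr
      intro i _
      simp [Bool.and_comm, beq_eq_decide]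
    · rw [if_neg h1]
      have h1' : p.2 ≠ 1 := by simpa using h1
      by_cases h0 : (p.2 == (0 : Int)) = true
      · have h0' : p.2 = 0 := beq_iff_eq.mp h0
        rw [if_pos h0, ih,
          show pvPos 0 (p :: l) = p.1 :: pvPos 0 l from by
            simp [pvPos, h0'],
          show pvPos 1 (p :: l) = pvPos 1 l from by
            simp [pvPos, h1']]
        refine Prod.ext ?_ rfl
        simp only [PySem.Set.discard, List.filter_filter]
        apply List.filter_congr
        intro i _
        simp [Bool.and_comm, beq_eq_decide]
      · have h0' : p.2 ≠ 0 := by simpa using h0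
        rw [if_neg h0, ih,
          show pvPos 0 (p :: l) = pvPos 0 l from by
            simp [pvPos, h0'],
          show pvPos 1 (p :: l) = pvPos 1 l from by
            simp [pvPos, h1']]

theorem pvRemRows (rows : List (List Int)) (s t : List Int) :
    rows.foldl (fun st sol =>
        (PySem.List.enumerate sol 0).foldl
          (fun st p => if p.2 == 1 then (st.1, PySem.Set.discard st.2 p.1)
                       else if p.2 == 0 then (PySem.Set.discard st.1 p.1, st.2) else st) st) (s, t)
    = (s.filter (fun i => rows.all (fun r => !(pvPos 0 (PySem.List.enumerate r 0)).contains i)),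
       t.filter (fun i => rows.all (fun r => !(pvPos 1 (PySem.List.enumerate r 0)).contains i))) := by
  induction rows generalizing s t with
  | nil => simp
  | cons r rows ih =>
    simp only [List.foldl_cons, pvRemLoop, ih]
    refine Prod.ext ?_ ?_ <;>
    · simp only [List.filter_filter]
      apply List.filter_congr
      intro i _
      simp [List.all_cons, Bool.and_comm]

theorem pvPos_sublist (v : Int) (l : List (Int × Int)) :
    (pvPos v l).Sublist (l.map (fun p => p.1)) := by
  induction l with
  | nil => simp [pvPos]
  | cons p l ih =>
    by_cases h : p.2 = v
    · simpa [pvPos, List.filterMap_cons, h] using ih.cons₂ p.1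
    · simpa [pvPos, List.filterMap_cons, h] using ih.cons p.1

theorem pvPos_nodup (v : Int) (xs : List Int) : (pvPos v (PySem.List.enumerate xs 0)).Nodup := by
  refine (pvPos_sublist v _).nodup ?_
  rw [PySem.List.map_fst_enumerate]
  exact PySem.List.nodup_pyRange_one _ _

theorem pvOfList_nodup {xs : List Int} (h : xs.Nodup) : PySem.Set.ofList xs = xs := by
  induction xs with
  | nil => rfl
  | cons x xs ih =>
    rw [PySem.Set.ofList_cons, ih (List.nodup_cons.mp h).2]
    have hx : x ∉ xs := (List.nodup_cons.mp h).1
    simp only [PySem.Set.discard]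
    rw [List.filter_eq_self.mpr]
    intro a ha
    simp only [Bool.not_eq_true', beq_eq_false_iff_ne, ne_eq]
    exact fun e => hx (e ▸ ha)

-- pvPos over an enumeration IS a filter of the index range
theorem pvPos_eq_filter (v : Int) (xs : List Int) :
    pvPos v (PySem.List.enumerate xs 0)
      = (PySem.List.pyRange 0 xs.length 1).filter (fun i => PySem.List.pyGet? xs i == some v) := by
  rw [PySem.List.enumerate_eq_map_pyRange xs 0, PySem.List.len_eq]
  have h : ∀ (l : List Int), (∀ j ∈ l, 0 ≤ j ∧ j < (xs.length : Int)) →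
      pvPos v (l.map (fun j => (j, PySem.List.pyGetD xs j 0)))
        = l.filter (fun i => PySem.List.pyGet? xs i == some v) := by
    intro l hl
    induction l with
    | nil => simp [pvPos]
    | cons a l ih =>
      obtain ⟨ha0, ha1⟩ := hl a (List.mem_cons_self)
      have h1 := PySem.List.pyGetD_eq_getElem xs (i := a) 0 ha0 ha1
      have h2 := PySem.List.pyGet?_eq_some_getElem xs (i := a) ha0 ha1
      simp only [List.map_cons, pvPos, List.filterMap_cons, List.filter_cons, h1, h2]
      rw [← pvPos, ih (fun j hj => hl j (List.mem_cons_of_mem a hj))]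
      by_cases hv : xs[a.toNat] = v
      · simp [hv]
      · simp [hv]
  exact h _ (fun j hj => (PySem.List.mem_pyRange_one).mp hj)

-- contains characterisation of pvPos for a nonnegative index
theorem pvPos_contains (v i : Int) (hi : 0 ≤ i) (xs : List Int) :
    (pvPos v (PySem.List.enumerate xs 0)).contains i
      = (decide (i < (xs.length : Int)) && (PySem.List.pyGet? xs i == some v)) := by
  rw [pvPos_eq_filter]
  rcases Bool.eq_false_or_eq_true (decide (i < (xs.length : Int)) && (PySem.List.pyGet? xs i == some v)) with h | h
  · rw [h]
    simp only [Bool.and_eq_true, decide_eq_true_iff] at h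
    rw [List.contains_eq_mem, decide_eq_true_iff, List.mem_filter]
    exact ⟨(PySem.List.mem_pyRange_one).mpr ⟨hi, h.1⟩, h.2⟩
  · rw [h]
    rw [Bool.eq_false_iff, ne_eq, List.contains_eq_mem, decide_eq_true_iff, List.mem_filter]
    rintro ⟨hr, hp⟩
    have hm := (PySem.List.mem_pyRange_one).mp hr
    simp only [Bool.and_eq_false_iff, decide_eq_false_iff_not, not_lt] at h
    rcases h with h | h
    · omega
    · rw [hp] at h; exact absurd h (by decide)

-- ===== VERDICT (by name: the statement is the Claim_ definition above) =====
theorem get_all_line_definite_cells_spec : Claim_equal_get_all_line_definite_cells := by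
  intro domains is_col index _hdom _hpre
  unfold Spec_get_all_line_definite_cells
  unfold get_all_line_definite_cells get_all_line_definite_cells_alt
  simp only []
  set sols : List (List Int) :=
    (((PySem.Dict.mk domains).get? is_col).bind (fun d => (PySem.Dict.mk d).get? index)).getD [] with hsols
  set first : List Int := (PySem.List.pyGet? sols 0).getD [] with hfirst
  set rest : List (List Int) := PySem.List.slice sols (some 1) none with hrest
  rw [pvAddLoop 1 0 (by decide), pvRemRows]
  have hup : ∀ (v : Int), PySem.Set.empty.update (pvPos v (PySem.List.enumerate first 0))
      = pvPos v (PySem.List.enumerate first 0) := by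
    intro v
    rw [PySem.Set.update_empty, pvOfList_nodup (pvPos_nodup v first)]
  rw [hup, hup, pvPos_eq_filter, pvPos_eq_filter]
  refine Prod.ext ?_ ?_ <;>
  · simp only [List.filter_filter]
    apply List.filter_congr
    intro i hi
    have hi0 : 0 ≤ i := ((PySem.List.mem_pyRange_one).mp hi).1
    have hc : ∀ (v : Int) (r : List Int),
        (pvPos v (PySem.List.enumerate r 0)).contains i
          = (decide (i < (r.length : Int)) && (PySem.List.pyGet? r i == some v)) :=
      fun v r => pvPos_contains v i hi0 r
    unfold pvStable
    simp only [hc]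
    rw [Bool.and_comm]
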